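-- pv_equiv track=rewrite | github.com/caseprepd-app/CaseSummarizer | src/core/utils/ocr_patterns.py | _has_suspicious_digits
-- ===== SOURCE A (Python) =====
-- OCR_DIGIT_LETTER_MAP: dict[str, str] = {
--     "0": "O",  # "J0hn" should be "John"
--     "1": "l",  # "Wi1son" should be "Wilson"
--     "5": "S",  # "5mith" should be "Smith"
--     "8": "B",  # "8rown" should be "Brown"
-- }
--
-- def _has_suspicious_digits(term: str) -> bool:
--     """
--     Check if a term has digits that look like OCR misreads of letters.
--
--     We only flag digits that:
--     1. Are in the OCR_DIGIT_LETTER_MAP (known confusion pairs)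
--     2. Are surrounded by letters (not at word boundaries)
--     3. The term otherwise looks like a name (has letters)
--
--     This avoids flagging legitimate alphanumeric identifiers like "ABC123".
--
--     Args:
--         term: Term to check
--
--     Returns:
--         True if suspicious digit patterns found
--     """
--     # Must have both letters and digits to be suspicious
--     has_letters = any(c.isalpha() for c in term)
--     has_digits = any(c.isdigit() for c in term)
--
--     if not (has_letters and has_digits):
--         return False
--
--     # Check each character position
--     for i, char in enumerate(term):
--         if char in OCR_DIGIT_LETTER_MAP:
--             # Check if this digit is surrounded by letters (embedded)
--             prev_is_letter = i > 0 and term[i - 1].isalpha()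
--             next_is_letter = i < len(term) - 1 and term[i + 1].isalpha()
--
--             if prev_is_letter or next_is_letter:
--                 # Digit is adjacent to letters - suspicious
--                 return True
--
--     return False
-- ===== SOURCE B (Python) =====
-- OCR_DIGIT_LETTER_MAP: dict[str, str] = {
--     "0": "O",
--     "1": "l",
--     "5": "S",
--     "8": "B",
-- }
--
-- # Single-pass finite-state machine: classify each character as a mapped OCR
-- # digit (D), a letter (L) or other (O), carry only the previous class, and
-- # report True on the first L->D or D->L transition.
--
-- def _classify(ch: str) -> str:
--     if ch in OCR_DIGIT_LETTER_MAP: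
--         return "D"
--     if ch.isalpha():
--         return "L"
--     return "O"
--
-- def _has_suspicious_digits(term: str) -> bool:
--     prev = "O"
--     for ch in term:
--         cur = _classify(ch)
--         if (prev == "L" and cur == "D") or (prev == "D" and cur == "L"):
--             return True
--         prev = cur
--     return False
-- ===== Notes on version B (the rewrite author's own statement) =====
-- stated objective: alternative
-- what changed: Replaced A's two upfront letter/digit scans plus an indexed loop probing term[i-1]/term[i+1] by a single-pass finite-state machine: each character is classified as mapped-digit/letter/other and only the previous class is carried, returning True on the first letter->digit or digit->letter transition (no indexing, no lookahead, no upfront passes).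
import Mathlib
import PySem

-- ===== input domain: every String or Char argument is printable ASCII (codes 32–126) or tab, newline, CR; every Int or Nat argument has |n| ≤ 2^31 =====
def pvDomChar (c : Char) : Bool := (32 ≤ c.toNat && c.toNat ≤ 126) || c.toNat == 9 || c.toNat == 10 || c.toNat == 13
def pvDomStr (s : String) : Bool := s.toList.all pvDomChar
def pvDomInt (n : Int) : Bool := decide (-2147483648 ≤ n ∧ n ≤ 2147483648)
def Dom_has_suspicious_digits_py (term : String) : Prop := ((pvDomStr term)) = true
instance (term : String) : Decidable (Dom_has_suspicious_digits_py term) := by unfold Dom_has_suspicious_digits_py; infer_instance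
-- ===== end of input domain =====

-- B replaces A's two upfront letter/digit scans plus an indexed prev/next loop by a one-pass
-- finite-state machine carrying only the previous character's class (alternative decomposition, same O(n) cost).

-- ===== PORT A =====
-- module-level constant OCR_DIGIT_LETTER_MAP (Python keys are the 1-char strings "0","1","5","8"; ported with Char keys since iteration over a str yields chars)
def OCR_DIGIT_LETTER_MAP : PySem.Dict Char String :=
  PySem.Dict.ofList [('0', "O"), ('1', "l"), ('5', "S"), ('8', "B")]

-- the 'for i, char in enumerate(term)' loop with its early return, index by index as in A
def hsdLoopA (l : List Char) (i : Nat) : Bool :=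
  if _h : i < l.length then
    if OCR_DIGIT_LETTER_MAP.contains l[i] then
      let prev_is_letter := decide (0 < i) && PySem.Chars.isalpha (l.getD (i - 1) ' ')
      let next_is_letter := decide (i < l.length - 1) && PySem.Chars.isalpha (l.getD (i + 1) ' ')
      if prev_is_letter || next_is_letter then true else hsdLoopA l (i + 1)
    else hsdLoopA l (i + 1)
  else false
termination_by l.length - i

def has_suspicious_digits_py (term : String) : Bool :=
  let l := term.toList
  let has_letters := l.any (fun c => PySem.Chars.isalpha c)
  let has_digits := l.any (fun c => PySem.Chars.isdigit c)
  if ¬ (has_letters && has_digits) then false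
  else hsdLoopA l 0

-- ===== PORT B =====
-- character classes of the state machine (Python's "D"/"L"/"O" strings)
inductive HsdCls | D | L | O
deriving DecidableEq, Repr

-- port of _classify
def hsdClassify (c : Char) : HsdCls :=
  if OCR_DIGIT_LETTER_MAP.contains c then HsdCls.D
  else if PySem.Chars.isalpha c then HsdCls.L
  else HsdCls.O

-- the for-loop of B: carry only the previous class, stop at the first L->D or D->L transition
def hsdRun (prev : HsdCls) : List Char → Bool
  | [] => false
  | c :: rest =>
    let cur := hsdClassify c
    if (prev = HsdCls.L ∧ cur = HsdCls.D) ∨ (prev = HsdCls.D ∧ cur = HsdCls.L) then true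
    else hsdRun cur rest

def has_suspicious_digits_py_alt (term : String) : Bool :=
  hsdRun HsdCls.O term.toList

-- ===== PRECONDITION & SPEC =====
def Spec_has_suspicious_digits_py (term : String) (out : Bool) : Prop := out = has_suspicious_digits_py_alt term
instance (term : String) (out : Bool) : Decidable (Spec_has_suspicious_digits_py term out) := by unfold Spec_has_suspicious_digits_py; infer_instance

-- ===== CLAIM (what is proved, stated in full; the proofs are below) =====
def Claim_equal_has_suspicious_digits_py : Prop := ∀ (term : String), Dom_has_suspicious_digits_py term → Spec_has_suspicious_digits_py term (has_suspicious_digits_py term)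

-- ===== LEMMAS AND PROOFS =====

def hsdCond (l : List Char) (j : Nat) : Prop :=
  j < l.length ∧ OCR_DIGIT_LETTER_MAP.contains (l.getD j ' ') = true ∧
    ((0 < j ∧ PySem.Chars.isalpha (l.getD (j - 1) ' ') = true) ∨
     (j + 1 < l.length ∧ PySem.Chars.isalpha (l.getD (j + 1) ' ') = true))

theorem loop_spec (l : List Char) (i : Nat) :
    hsdLoopA l i = true ↔ ∃ j, i ≤ j ∧ hsdCond l j := by
  fun_induction hsdLoopA l i with
  | case1 i h hc pl nl hpn =>
    simp only [pl, nl] at hpn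
    simp only [true_iff]
    refine ⟨i, le_refl i, h, ?_, ?_⟩
    · rw [List.getD_eq_getElem _ _ h]; exact hc
    · simp only [Bool.or_eq_true, Bool.and_eq_true, decide_eq_true_eq] at hpn
      rcases hpn with ⟨h0, ha⟩ | ⟨hn, ha⟩
      · exact Or.inl ⟨h0, ha⟩
      · exact Or.inr ⟨by omega, ha⟩
  | case2 i h hc pl nl hpn ih =>
    rw [ih]
    constructor
    · rintro ⟨j, hij, hj⟩; exact ⟨j, by omega, hj⟩
    · rintro ⟨j, hij, hj⟩
      refine ⟨j, ?_, hj⟩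
      rcases Nat.eq_or_lt_of_le hij with rfl | h'
      · exfalso
        rcases hj with ⟨hjl, hm, hside⟩
        apply hpn
        simp only [pl, nl, Bool.or_eq_true, Bool.and_eq_true, decide_eq_true_eq]
        rcases hside with ⟨h0, ha⟩ | ⟨hn, ha⟩
        · exact Or.inl ⟨h0, ha⟩
        · exact Or.inr ⟨by omega, ha⟩
      · omega
  | case3 i h hc ih =>
    rw [ih]
    constructor
    · rintro ⟨j, hij, hj⟩; exact ⟨j, by omega, hj⟩
    · rintro ⟨j, hij, hj⟩
      refine ⟨j, ?_, hj⟩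
      rcases Nat.eq_or_lt_of_le hij with rfl | h'
      · exfalso; rcases hj with ⟨hjl, hm, _⟩
        rw [List.getD_eq_getElem _ _ hjl] at hm; exact hc hm
      · omega
  | case4 i h =>
    simp only [Bool.false_eq_true, false_iff]
    rintro ⟨j, hij, hjl, _⟩; omega

-- the adjacent-pair predicate B's machine detects, in symmetric char form
def hsdPairPred (p : Char × Char) : Bool :=
  (OCR_DIGIT_LETTER_MAP.contains p.1 && PySem.Chars.isalpha p.2)
  || (OCR_DIGIT_LETTER_MAP.contains p.2 && PySem.Chars.isalpha p.1)

theorem pair_spec (l : List Char) (p : Char × Char → Bool) :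
    (l.zip (l.drop 1)).any p = true ↔
      ∃ j, j + 1 < l.length ∧ p (l.getD j ' ', l.getD (j + 1) ' ') = true := by
  rw [List.any_eq_true]
  constructor
  · rintro ⟨x, hx, hp⟩
    rcases List.mem_iff_getElem.mp hx with ⟨j, hj, rfl⟩
    have hjl : j + 1 < l.length := by
      have := hj; simp [List.length_zip] at this; omega
    refine ⟨j, hjl, ?_⟩
    have := List.getElem_zip (i := j) (h := hj)
    rw [this] at hp
    rw [List.getD_eq_getElem _ _ (by omega), List.getD_eq_getElem _ _ hjl]
    (convert hp using 3; simp)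
  · rintro ⟨j, hjl, hp⟩
    have hj : j < (l.zip (l.drop 1)).length := by simp [List.length_zip]; omega
    refine ⟨(l.zip (l.drop 1))[j], List.getElem_mem hj, ?_⟩
    rw [List.getElem_zip]
    rw [List.getD_eq_getElem _ _ (by omega), List.getD_eq_getElem _ _ hjl] at hp
    (convert hp using 3; simp)

theorem mapped_isdigit (c : Char) (h : OCR_DIGIT_LETTER_MAP.contains c = true) :
    PySem.Chars.isdigit c = true := by
  have hc : OCR_DIGIT_LETTER_MAP.contains c = (c == '0' || c == '1' || c == '5' || c == '8') := by
    show ([('0', "O"), ('1', "l"), ('5', "S"), ('8', "B")] : List (Char × String)).any (fun p => p.1 == c)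
        = (c == '0' || c == '1' || c == '5' || c == '8')
    simp [List.any_cons, List.any_nil, BEq.comm, Bool.or_assoc]
  rw [hc] at h
  simp only [Bool.or_eq_true, beq_iff_eq] at h
  rcases h with (((h|h)|h)|h) <;> subst h <;> decide

theorem mapped_not_alpha (c : Char) (h : OCR_DIGIT_LETTER_MAP.contains c = true) :
    PySem.Chars.isalpha c = false := by
  have hc : OCR_DIGIT_LETTER_MAP.contains c = (c == '0' || c == '1' || c == '5' || c == '8') := by
    show ([('0', "O"), ('1', "l"), ('5', "S"), ('8', "B")] : List (Char × String)).any (fun p => p.1 == c)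
        = (c == '0' || c == '1' || c == '5' || c == '8')
    simp [List.any_cons, List.any_nil, BEq.comm, Bool.or_assoc]
  rw [hc] at h
  simp only [Bool.or_eq_true, beq_iff_eq] at h
  rcases h with (((h|h)|h)|h) <;> subst h <;> decide

-- the machine's transition test on two chars equals the symmetric pair predicate
theorem bad_eq_pred (a b : Char) :
    (decide ((hsdClassify a = HsdCls.L ∧ hsdClassify b = HsdCls.D)
      ∨ (hsdClassify a = HsdCls.D ∧ hsdClassify b = HsdCls.L))) = hsdPairPred (a, b) := by
  unfold hsdClassify hsdPairPred
  by_cases hca : OCR_DIGIT_LETTER_MAP.contains a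
  · have := mapped_not_alpha a hca
    by_cases hcb : OCR_DIGIT_LETTER_MAP.contains b
    · have := mapped_not_alpha b hcb
      simp_all
    · simp only [hca, hcb, if_true, Bool.false_eq_true, if_false]
      by_cases hb : PySem.Chars.isalpha b <;> simp_all
  · by_cases hcb : OCR_DIGIT_LETTER_MAP.contains b
    · have := mapped_not_alpha b hcb
      simp only [hca, hcb, Bool.false_eq_true, if_false, if_true]
      by_cases ha : PySem.Chars.isalpha a <;> simp_all
    · simp only [hca, hcb, Bool.false_eq_true, if_false]
      by_cases ha : PySem.Chars.isalpha a <;> by_cases hb : PySem.Chars.isalpha b <;> simp_all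

-- head predicate: does the carried class together with the first char fire?
def hsdHead (prev : HsdCls) : List Char → Bool
  | [] => false
  | c :: _ => decide ((prev = HsdCls.L ∧ hsdClassify c = HsdCls.D)
      ∨ (prev = HsdCls.D ∧ hsdClassify c = HsdCls.L))

theorem hsdRun_eq (l : List Char) : ∀ prev,
    hsdRun prev l = (hsdHead prev l || (l.zip (l.drop 1)).any hsdPairPred) := by
  induction l with
  | nil => intro prev; rfl
  | cons c rest ih =>
    intro prev
    show (if (prev = HsdCls.L ∧ hsdClassify c = HsdCls.D)
        ∨ (prev = HsdCls.D ∧ hsdClassify c = HsdCls.L) then true else hsdRun (hsdClassify c) rest) = _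
    rw [ih (hsdClassify c)]
    cases rest with
    | nil =>
      simp only [hsdHead]
      split <;> simp_all [hsdHead]
    | cons d rest' =>
      have hpair : ((c :: d :: rest').zip ((c :: d :: rest').drop 1)).any hsdPairPred
          = (hsdPairPred (c, d) || ((d :: rest').zip ((d :: rest').drop 1)).any hsdPairPred) := by
        simp [List.zip_cons_cons, List.any_cons]
      rw [hpair]
      have hh : hsdHead (hsdClassify c) (d :: rest') = hsdPairPred (c, d) := bad_eq_pred c d
      rw [hh]
      split
      · rename_i h
        simp [hsdHead, h]
      · rename_i h
        have : hsdHead prev (c :: d :: rest') = false := by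
          simp [hsdHead]; tauto
        rw [this, Bool.false_or]

theorem hsdHead_O (l : List Char) : hsdHead HsdCls.O l = false := by
  cases l with
  | nil => rfl
  | cons c rest => simp [hsdHead]

theorem alt_eq_pairs (term : String) :
    has_suspicious_digits_py_alt term
      = (term.toList.zip (term.toList.drop 1)).any hsdPairPred := by
  unfold has_suspicious_digits_py_alt
  rw [hsdRun_eq, hsdHead_O, Bool.false_or]

theorem mem_of_getD {l : List Char} {j : Nat} (hj : j < l.length) : l.getD j ' ' ∈ l := by
  rw [List.getD_eq_getElem _ _ hj]; exact List.getElem_mem hj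

theorem main_eq (term : String) :
    has_suspicious_digits_py term = has_suspicious_digits_py_alt term := by
  rw [alt_eq_pairs]
  unfold has_suspicious_digits_py
  set l := term.toList with hl
  simp only []
  by_cases hB : (l.zip (l.drop 1)).any hsdPairPred = true
  · rw [hB]
    rcases (pair_spec l _).mp hB with ⟨j, hjl, hp⟩
    simp only [hsdPairPred, Bool.or_eq_true, Bool.and_eq_true] at hp
    have hloop : hsdLoopA l 0 = true := by
      rw [loop_spec]
      rcases hp with ⟨hm, ha⟩ | ⟨hm, ha⟩
      · exact ⟨j, Nat.zero_le _, by omega, hm, Or.inr ⟨hjl, ha⟩⟩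
      · refine ⟨j + 1, Nat.zero_le _, hjl, hm, Or.inl ⟨by omega, ?_⟩⟩
        simpa using ha
    have hletters : l.any (fun c => PySem.Chars.isalpha c) = true := by
      rw [List.any_eq_true]
      rcases hp with ⟨hm, ha⟩ | ⟨hm, ha⟩
      · exact ⟨_, mem_of_getD hjl, ha⟩
      · exact ⟨_, mem_of_getD (by omega), ha⟩
    have hdigits : l.any (fun c => PySem.Chars.isdigit c) = true := by
      rw [List.any_eq_true]
      rcases hp with ⟨hm, ha⟩ | ⟨hm, ha⟩
      · exact ⟨_, mem_of_getD (by omega), mapped_isdigit _ hm⟩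
      · exact ⟨_, mem_of_getD hjl, mapped_isdigit _ hm⟩
    rw [hletters, hdigits, hloop]
    simp
  · rw [Bool.not_eq_true] at hB
    rw [hB]
    have hloop : hsdLoopA l 0 = false := by
      rw [Bool.eq_false_iff, Ne, loop_spec]
      rintro ⟨j, -, hjl, hm, hside⟩
      rw [Bool.eq_false_iff] at hB
      apply hB
      rw [pair_spec]
      rcases hside with ⟨h0, ha⟩ | ⟨hn, ha⟩
      · refine ⟨j - 1, by omega, ?_⟩
        have : j - 1 + 1 = j := by omega
        rw [this]
        simp only [hsdPairPred, Bool.or_eq_true, Bool.and_eq_true]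
        exact Or.inr ⟨hm, ha⟩
      · exact ⟨j, hn, by simp only [hsdPairPred, Bool.or_eq_true, Bool.and_eq_true]; exact Or.inl ⟨hm, ha⟩⟩
    split
    · rfl
    · exact hloop

-- ===== VERDICT (by name: the statement is the Claim_ definition above) =====
theorem has_suspicious_digits_py_spec : Claim_equal_has_suspicious_digits_py := by
  intro term _
  unfold Spec_has_suspicious_digits_py
  exact main_eq term
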